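-- pv_equiv track=rewrite | github.com/narendranathe/autoapply-ai | backend/app/services/retrieval_agent.py | _company_matches
-- ===== SOURCE A (Python) =====
-- def _levenshtein(s1: str, s2: str) -> int:
--     """Simple Levenshtein distance for fuzzy company name matching."""
--     m, n = len(s1), len(s2)
--     dp = list(range(n + 1))
--     for i in range(1, m + 1):
--         prev = dp[0]
--         dp[0] = i
--         for j in range(1, n + 1):
--             temp = dp[j]
--             if s1[i - 1] == s2[j - 1]:
--                 dp[j] = prev
--             else:
--                 dp[j] = 1 + min(prev, dp[j], dp[j - 1])
--             prev = temp
--     return dp[n]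
--
-- def _company_matches(stored: str, query: str, threshold: int = 3) -> bool:
--     """
--     True if stored company name is close enough to the query.
--     Handles short names (GS ≈ Goldman Sachs) via token matching too.
--     """
--     s, q = stored.lower().strip(), query.lower().strip()
--     if s == q:
--         return True
--     if s in q or q in s:
--         return True
--     # Abbreviation match: "Goldman Sachs" vs "GS"
--     initials = "".join(w[0] for w in s.split() if w)
--     if initials == q or q == initials:
--         return True
--     # Levenshtein for typos / short variations
--     return _levenshtein(s, q) <= threshold
-- ===== SOURCE B (Python) =====
-- def _lev_memo(s1, s2):
--     """Top-down memoized edit distance: dist(i, j) = distance of the first i / j chars."""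
--     memo = {}
--
--     def dist(i, j):
--         if i == 0:
--             return j
--         if j == 0:
--             return i
--         cached = memo.get((i, j))
--         if cached is not None:
--             return cached
--         if s1[i - 1] == s2[j - 1]:
--             r = dist(i - 1, j - 1)
--         else:
--             r = 1 + min(dist(i - 1, j - 1), dist(i - 1, j), dist(i, j - 1))
--         memo[(i, j)] = r
--         return r
--
--     return dist(len(s1), len(s2))
--
--
-- def _company_matches(stored: str, query: str, threshold: int = 3) -> bool:
--     s, q = stored.lower().strip(), query.lower().strip()
--     if s == q:
--         return True
--     if s in q or q in s:
--         return True
--     initials = "".join(w[0] for w in s.split() if w)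
--     if initials == q or q == initials:
--         return True
--     return _lev_memo(s, q) <= threshold
-- ===== Notes on version B (the rewrite author's own statement) =====
-- stated objective: alternative
-- what changed: The Levenshtein distance is computed by a top-down memoized recursion dist(i,j) over prefix lengths (dict cache, recursion instead of the mutable one-row bottom-up DP); the four matching checks are unchanged.
import Mathlib
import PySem

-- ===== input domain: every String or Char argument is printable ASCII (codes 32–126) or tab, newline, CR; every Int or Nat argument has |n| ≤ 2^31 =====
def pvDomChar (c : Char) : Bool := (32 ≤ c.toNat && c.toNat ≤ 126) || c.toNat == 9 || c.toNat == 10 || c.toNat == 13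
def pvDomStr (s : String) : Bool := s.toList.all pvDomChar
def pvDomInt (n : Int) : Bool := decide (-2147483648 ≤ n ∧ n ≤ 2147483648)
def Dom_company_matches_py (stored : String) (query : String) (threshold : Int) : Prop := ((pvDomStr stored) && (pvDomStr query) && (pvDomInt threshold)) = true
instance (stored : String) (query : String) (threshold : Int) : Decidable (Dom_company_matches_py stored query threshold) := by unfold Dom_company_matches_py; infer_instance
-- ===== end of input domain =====

-- B replaces the one-row bottom-up Levenshtein loop by a top-down memoized recursion over prefix lengths; the four matching checks are unchanged (objective: alternative decomposition).

-- ===== PORT A =====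
-- inner loop 'for j in range(1, n+1)': walks s2 and the old row together; prev = old dp[j-1], left = new dp[j-1]
def levRowA (x : Char) : List Char → List Int → Int → Int → List Int
  | y :: ys, t :: ts, prev, left =>
      let v := if x = y then prev else 1 + min prev (min t left)
      v :: levRowA x ys ts t v
  | _, _, _, _ => []

-- _levenshtein: dp = list(range(n+1)); outer loop over i = 1..m carrying (dp, i-1); s1[i-1] is the fold's element
def levenshteinA (s1 s2 : List Char) : Int :=
  let dp0 : List Int := (List.range (s2.length + 1)).map Int.ofNat
  let fin := s1.foldl (fun (st : List Int × Nat) x =>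
      let i := st.2 + 1
      (((i : Int)) :: levRowA x s2 st.1.tail (st.1.headD 0) (i : Int), i)) (dp0, 0)
  fin.1.getD s2.length 0

def company_matches_py (stored : String) (query : String) (threshold : Int) : Bool :=
  let s := PySem.Str.strip (PySem.Str.lower stored)
  let q := PySem.Str.strip (PySem.Str.lower query)
  if s == q then true
  else if PySem.Str.isIn s q || PySem.Str.isIn q s then true
  else
    -- w[0] of each (always nonempty) split() token; headD's default is unreachable after the 'if w' filter
    let initials := String.ofList (((PySem.Chars.split₀ s.toList).filter (fun w => !w.isEmpty)).map (fun w => w.headD ' '))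
    if initials == q || q == initials then true
    else decide (levenshteinA s.toList q.toList ≤ threshold)

-- ===== PORT B =====
-- dist(i, j) of Source B with the memo dict threaded through; s1[i-1]/s2[j-1] are always in range at call sites, so getD's default is unreachable
def distMemoB (a b : List Char) : Nat → Nat → PySem.Dict (Nat × Nat) Int → Int × PySem.Dict (Nat × Nat) Int
  | 0, j, m => ((j : Int), m)
  | i + 1, 0, m => ((i + 1 : Int), m)
  | i + 1, j + 1, m =>
    match PySem.Dict.get? m (i + 1, j + 1) with
    | some v => (v, m)
    | none =>
      let r :=
        if a.getD i ' ' = b.getD j ' ' then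
          distMemoB a b i j m
        else
          let p1 := distMemoB a b i j m
          let p2 := distMemoB a b i (j + 1) p1.2
          let p3 := distMemoB a b (i + 1) j p2.2
          (1 + min p1.1 (min p2.1 p3.1), p3.2)
      (r.1, PySem.Dict.insert r.2 (i + 1, j + 1) r.1)
  termination_by i j _ => i + j

-- _lev_memo: dist(len(s1), len(s2)) starting from an empty memo
def levenshteinB (s1 s2 : List Char) : Int :=
  (distMemoB s1 s2 s1.length s2.length PySem.Dict.empty).1

def company_matches_py_alt (stored : String) (query : String) (threshold : Int) : Bool :=
  let s := PySem.Str.strip (PySem.Str.lower stored)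
  let q := PySem.Str.strip (PySem.Str.lower query)
  if s == q then true
  else if PySem.Str.isIn s q || PySem.Str.isIn q s then true
  else
    let initials := String.ofList (((PySem.Chars.split₀ s.toList).filter (fun w => !w.isEmpty)).map (fun w => w.headD ' '))
    if initials == q || q == initials then true
    else decide (levenshteinB s.toList q.toList ≤ threshold)

-- ===== PRECONDITION & SPEC =====
def Spec_company_matches_py (stored : String) (query : String) (threshold : Int) (out : Bool) : Prop := out = company_matches_py_alt stored query threshold
instance (stored : String) (query : String) (threshold : Int) (out : Bool) : Decidable (Spec_company_matches_py stored query threshold out) := by unfold Spec_company_matches_py; infer_instance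

-- ===== CLAIM (what is proved, stated in full; the proofs are below) =====
def Claim_equal_company_matches_py : Prop := ∀ (stored : String) (query : String) (threshold : Int), Dom_company_matches_py stored query threshold → Spec_company_matches_py stored query threshold (company_matches_py stored query threshold)

-- ===== LEMMAS AND PROOFS =====

-- the common recursive specification: edit distance of the first i / j characters
def dSpec (a b : List Char) : Nat → Nat → Int
  | 0, j => (j : Int)
  | i + 1, 0 => (i + 1 : Int)
  | i + 1, j + 1 =>
      if a.getD i ' ' = b.getD j ' ' then dSpec a b i j
      else 1 + min (dSpec a b i j) (min (dSpec a b i (j + 1)) (dSpec a b (i + 1) j))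
  termination_by i j => i + j

lemma dSpec_succ (a b : List Char) (i j : Nat) :
    dSpec a b (i + 1) (j + 1) =
      if a.getD i ' ' = b.getD j ' ' then dSpec a b i j
      else 1 + min (dSpec a b i j) (min (dSpec a b i (j + 1)) (dSpec a b (i + 1) j)) := by
  conv_lhs => rw [dSpec]

lemma dSpec_zero_right (a b : List Char) (k : Nat) : dSpec a b k 0 = (k : Int) := by
  cases k <;> simp [dSpec]

-- B side: the memo only ever holds correct values, and distMemoB returns dSpec
def MemoOK (a b : List Char) (m : PySem.Dict (Nat × Nat) Int) : Prop :=
  ∀ p v, PySem.Dict.get? m p = some v → v = dSpec a b p.1 p.2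

lemma memoOK_insert (a b : List Char) (m : PySem.Dict (Nat × Nat) Int) (i j : Nat) (v : Int)
    (h : MemoOK a b m) (hv : v = dSpec a b i j) : MemoOK a b (PySem.Dict.insert m (i, j) v) := by
  intro p w hp
  rw [PySem.Dict.get?_insert] at hp
  split at hp
  · next heq => cases hp; subst heq; simpa using hv
  · exact h p w hp

lemma distMemoB_correct (a b : List Char) :
    ∀ (i j : Nat) (m : PySem.Dict (Nat × Nat) Int), MemoOK a b m →
      (distMemoB a b i j m).1 = dSpec a b i j ∧ MemoOK a b (distMemoB a b i j m).2 := by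
  intro i j m
  induction i, j, m using distMemoB.induct a b with
  | case1 j m => intro h; simpa [distMemoB, dSpec] using h
  | case2 i m => intro h; simpa [distMemoB, dSpec] using h
  | case3 i j m v hv =>
      intro h
      refine ⟨?_, ?_⟩
      · simpa [distMemoB, hv] using (h _ _ hv)
      · simpa [distMemoB, hv] using h
  | case4 i j m hv ih1 ihd ih2 ih3 =>
      intro h
      by_cases hc : a[i]?.getD ' ' = b[j]?.getD ' '
      · obtain ⟨e1, hm1⟩ := ih1 h
        have hd : dSpec a b (i+1) (j+1) = dSpec a b i j := by
          rw [dSpec_succ]; simp [List.getD, hc]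
        constructor
        · simp [distMemoB, hv, List.getD, hc, e1, hd]
        · have := memoOK_insert a b (distMemoB a b i j m).2 (i+1) (j+1) (distMemoB a b i j m).1 hm1 (by rw [e1, hd])
          simpa [distMemoB, hv, List.getD, hc] using this
      · obtain ⟨e1, hm1⟩ := ih1 h
        obtain ⟨e2, hm2⟩ := ih2 hm1
        obtain ⟨e3, hm3⟩ := ih3 hm2
        have hd : dSpec a b (i+1) (j+1)
            = 1 + min (dSpec a b i j) (min (dSpec a b i (j + 1)) (dSpec a b (i + 1) j)) := by
          rw [dSpec_succ]; simp [List.getD, hc]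
        constructor
        · simp [distMemoB, hv, List.getD, hc, e1, e2, e3, hd]
        · have := memoOK_insert a b _ (i+1) (j+1) _ hm3 (by rw [hd, ← e1, ← e2, ← e3])
          simpa [distMemoB, hv, List.getD, hc] using this

lemma levenshteinB_eq (s1 s2 : List Char) :
    levenshteinB s1 s2 = dSpec s1 s2 s1.length s2.length :=
  (distMemoB_correct s1 s2 _ _ _ (by intro p v h; simp at h)).1

-- A side: the inner loop maps row k of the DP table to row k+1, on any aligned suffix
lemma levRowA_spec (a b : List Char) (k : Nat) :
    ∀ (len j0 : Nat), b.length = j0 + len →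
      levRowA (a.getD k ' ') (b.drop j0) ((List.range' (j0 + 1) len).map (fun j => dSpec a b k j))
          (dSpec a b k j0) (dSpec a b (k + 1) j0)
        = (List.range' (j0 + 1) len).map (fun j => dSpec a b (k + 1) j) := by
  intro len
  induction len with
  | zero => intro j0 h; simp [levRowA]
  | succ len ih =>
      intro j0 h
      have hj : j0 < b.length := by omega
      rw [List.range'_succ, List.map_cons, List.map_cons,
          List.drop_eq_getElem_cons hj, levRowA]
      have hy : b[j0] = b.getD j0 ' ' := (List.getD_eq_getElem b ' ' hj).symm
      have hv : (if a.getD k ' ' = b[j0] then dSpec a b k j0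
            else 1 + min (dSpec a b k j0) (min (dSpec a b k (j0+1)) (dSpec a b (k+1) j0)))
          = dSpec a b (k + 1) (j0 + 1) := by
        rw [dSpec_succ, hy]
      simp only [hv]
      have := ih (j0 + 1) (by omega)
      simpa [Nat.add_assoc] using this

-- A side: the outer fold over the first k characters of s1 produces row k of the DP table
lemma levenshteinA_fold (s1 s2 : List Char) :
    ∀ k, k ≤ s1.length →
      (s1.take k).foldl (fun (st : List Int × Nat) x =>
          let i := st.2 + 1
          (((i : Int)) :: levRowA x s2 st.1.tail (st.1.headD 0) (i : Int), i))
        ((List.range (s2.length + 1)).map Int.ofNat, 0)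
      = ((List.range (s2.length + 1)).map (fun j => dSpec s1 s2 k j), k) := by
  intro k
  induction k with
  | zero =>
      intro _
      simp only [List.take_zero, List.foldl_nil, Prod.mk.injEq]
      refine ⟨List.map_congr_left (fun j _ => by simp [dSpec]), trivial⟩
  | succ k ih =>
      intro hk
      have hklt : k < s1.length := by omega
      rw [List.take_add_one, List.getElem?_eq_getElem hklt]
      simp only [Option.toList_some, List.foldl_append, List.foldl_cons, List.foldl_nil]
      rw [ih (by omega)]
      have hrange : List.range (s2.length + 1) = 0 :: List.range' 1 s2.length := by
        rw [List.range_eq_range', List.range'_succ]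
      rw [hrange]
      simp only [List.map_cons, List.tail_cons, List.headD_cons]
      rw [dSpec_zero_right]
      have hx : s1[k] = s1.getD k ' ' := (List.getD_eq_getElem s1 ' ' hklt).symm
      have hrow := levRowA_spec s1 s2 k s2.length 0 (by omega)
      rw [List.drop_zero] at hrow
      rw [dSpec_zero_right, dSpec_zero_right] at hrow
      simp only [Nat.zero_add] at hrow
      rw [dSpec_zero_right s1 s2 (k+1)]
      rw [hx]
      rw [Prod.mk.injEq]
      refine ⟨?_, rfl⟩
      rw [hrow]

lemma levenshteinA_eq (s1 s2 : List Char) :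
    levenshteinA s1 s2 = dSpec s1 s2 s1.length s2.length := by
  unfold levenshteinA
  have h := levenshteinA_fold s1 s2 s1.length (le_refl _)
  rw [List.take_length] at h
  simp only [h]
  rw [List.getD_eq_getElem _ _ (by simp)]
  simp

-- ===== VERDICT (by name: the statement is the Claim_ definition above) =====
theorem company_matches_py_spec : Claim_equal_company_matches_py := by
  intro stored query threshold _
  unfold Spec_company_matches_py company_matches_py company_matches_py_alt
  simp only [levenshteinA_eq, levenshteinB_eq]
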